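-- pv_equiv track=rewrite | github.com/pypi-data/pypi-mirror-395 | packages/format-docstring/format_docstring-0.2.7.tar.gz/format_docstring-0.2.7/format_docstring/line_wrap_utils.py | _is_grid_separator_line
-- ===== SOURCE A (Python) =====
-- def _is_grid_separator_line(line: str) -> bool:
--     """
--     Check if line is a grid table separator (starts with + and contains + - =).
--     """
--     if not line or not line.startswith('+'):
--         return False
--     # Should contain only +, -, =, and spaces
--     # Must end with + to be a complete separator line
--     return (
--         all(c in '+-= ' for c in line)
--         and '+' in line
--         and line.rstrip().endswith('+')
--     )
-- ===== SOURCE B (Python) =====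
-- # Table-driven DFA (hand-compiled from the regex ^\+(?:[-+= ]*\+)?[ ]*$):
-- # states: 'S' start, 'P' last non-space char seen was '+' (accepting),
-- #         'B' last non-space char seen was '-' or '=' (not accepting).
-- _DFA = {
--     'S': {'+': 'P'},
--     'P': {'+': 'P', '-': 'B', '=': 'B', ' ': 'P'},
--     'B': {'+': 'P', '-': 'B', '=': 'B', ' ': 'B'},
-- }
--
--
-- def _is_grid_separator_line(line: str) -> bool:
--     """Run the DFA over the line; accept iff it ends in state 'P'."""
--     state = 'S'
--     for c in line:
--         state = _DFA[state].get(c)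
--         if state is None:
--             return False
--     return state == 'P'
-- ===== Notes on version B (the rewrite author's own statement) =====
-- stated objective: alternative
-- what changed: Replaces A's three builtin scans (all-membership, '+' containment, rstrip().endswith('+')) by a hand-compiled table-driven DFA for the regex ^\+(?:[-+= ]*\+)? *$: a dict-of-dicts transition table driven by a tiny interpreter loop, accepting iff the run ends in the accepting state.
import Mathlib
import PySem

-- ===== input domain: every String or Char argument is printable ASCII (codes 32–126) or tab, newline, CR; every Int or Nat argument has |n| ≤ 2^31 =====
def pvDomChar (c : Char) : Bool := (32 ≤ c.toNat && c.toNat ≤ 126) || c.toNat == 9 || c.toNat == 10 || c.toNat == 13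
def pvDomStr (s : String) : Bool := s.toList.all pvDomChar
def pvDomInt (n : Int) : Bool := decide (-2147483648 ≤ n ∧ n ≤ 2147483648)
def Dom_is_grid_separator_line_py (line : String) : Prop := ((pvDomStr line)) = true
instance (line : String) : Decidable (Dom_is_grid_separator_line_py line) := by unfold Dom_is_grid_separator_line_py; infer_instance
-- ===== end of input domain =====

-- B replaces A's three builtin scans by a table-driven DFA (dict-of-dicts transition
-- table + tiny interpreter loop) hand-compiled from the separator regex; same cost.


-- ===== PORT A =====
-- `c in '+-= '` for a single char is ported as the four-way comparison (exact: single-char containment = membership)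
def is_grid_separator_line_py (line : String) : Bool :=
  if line.toList.isEmpty || !(PySem.Chars.startswith line.toList ['+']) then false
  else
    (line.toList.all (fun c => c == '+' || c == '-' || c == '=' || c == ' '))
      && PySem.Chars.isIn ['+'] line.toList
      && PySem.Chars.endswith (PySem.Chars.rstrip line.toList) ['+']

-- ===== PORT B =====
-- Source B's module-level _DFA transition table (dict of dicts)
def pvDFA : PySem.Dict Char (PySem.Dict Char Char) :=
  PySem.Dict.mk
    [ ('S', PySem.Dict.mk [('+', 'P')])
    , ('P', PySem.Dict.mk [('+', 'P'), ('-', 'B'), ('=', 'B'), (' ', 'P')])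
    , ('B', PySem.Dict.mk [('+', 'P'), ('-', 'B'), ('=', 'B'), (' ', 'B')]) ]

-- the for-loop of Source B: _DFA[state].get(c); return False on a missing transition
-- (_DFA[state] never raises: state is always a key; ported as get? + early False)
def pvDfaRun : List Char → Char → Bool
  | [], st => st == 'P'
  | c :: cs, st =>
    match (PySem.Dict.get? pvDFA st).bind (fun row => PySem.Dict.get? row c) with
    | none => false
    | some st' => pvDfaRun cs st'

def is_grid_separator_line_py_alt (line : String) : Bool :=
  pvDfaRun line.toList 'S'

-- ===== PRECONDITION & SPEC =====
def Spec_is_grid_separator_line_py (line : String) (out : Bool) : Prop := out = is_grid_separator_line_py_alt line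
instance (line : String) (out : Bool) : Decidable (Spec_is_grid_separator_line_py line out) := by unfold Spec_is_grid_separator_line_py; infer_instance

-- ===== CLAIM (what is proved, stated in full; the proofs are below) =====
def Claim_equal_is_grid_separator_line_py : Prop := ∀ (line : String), Dom_is_grid_separator_line_py line → Spec_is_grid_separator_line_py line (is_grid_separator_line_py line)

-- ===== LEMMAS AND PROOFS =====

-- the two live transition rows, evaluated
theorem pvStepP (c : Char) :
    (PySem.Dict.get? pvDFA 'P').bind (fun row => PySem.Dict.get? row c) =
      (if c == '+' then some 'P' else if c == '-' then some 'B'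
       else if c == '=' then some 'B' else if c == ' ' then some 'P' else none) := by
  by_cases h1 : c = '+'
  · subst h1; decide
  · by_cases h2 : c = '-'
    · subst h2; decide
    · by_cases h3 : c = '='
      · subst h3; decide
      · by_cases h4 : c = ' '
        · subst h4; decide
        · simp [pvDFA, PySem.Dict.get?, h1, h2, h3, h4,
            Ne.symm h1, Ne.symm h2, Ne.symm h3, Ne.symm h4]

theorem pvStepB (c : Char) :
    (PySem.Dict.get? pvDFA 'B').bind (fun row => PySem.Dict.get? row c) =
      (if c == '+' then some 'P' else if c == '-' then some 'B'
       else if c == '=' then some 'B' else if c == ' ' then some 'B' else none) := by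
  by_cases h1 : c = '+'
  · subst h1; decide
  · by_cases h2 : c = '-'
    · subst h2; decide
    · by_cases h3 : c = '='
      · subst h3; decide
      · by_cases h4 : c = ' '
        · subst h4; decide
        · simp [pvDFA, PySem.Dict.get?, h1, h2, h3, h4,
            Ne.symm h1, Ne.symm h2, Ne.symm h3, Ne.symm h4]

theorem pvStepS (c : Char) :
    (PySem.Dict.get? pvDFA 'S').bind (fun row => PySem.Dict.get? row c) =
      (if c == '+' then some 'P' else none) := by
  by_cases h1 : c = '+'
  · subst h1; decide
  · simp [pvDFA, PySem.Dict.get?, h1, Ne.symm h1]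

-- appending a non-space char: it becomes the head of the stripped reverse (default irrelevant)
theorem pvKey (ys : List Char) (c : Char) (hc : PySem.Chars.isspace c = false) :
    (List.dropWhile PySem.Chars.isspace (ys ++ [c])).head? =
      some ((List.dropWhile PySem.Chars.isspace ys).headD c) := by
  rw [List.dropWhile_append]
  cases h : List.dropWhile PySem.Chars.isspace ys with
  | nil => simp [List.dropWhile, hc]
  | cons a t => simp

theorem pvKeyD (ys : List Char) (c d : Char) (hc : PySem.Chars.isspace c = false) :
    (List.dropWhile PySem.Chars.isspace (ys ++ [c])).headD d =
      (List.dropWhile PySem.Chars.isspace ys).headD c := by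
  rw [List.headD_eq_head?_getD, pvKey ys c hc]; rfl

-- appending a space does not change the head of the stripped reverse
theorem pvKeySp (ys : List Char) (d : Char) :
    (List.dropWhile PySem.Chars.isspace (ys ++ [' '])).headD d =
      (List.dropWhile PySem.Chars.isspace ys).headD d := by
  rw [List.dropWhile_append]
  cases h : List.dropWhile PySem.Chars.isspace ys with
  | nil =>
    have hs : PySem.Chars.isspace ' ' = true := by decide
    simp [List.dropWhile, hs]
  | cons a t => simp

-- only the '+'-test of the headD matters, not which non-'+' default is carried
theorem pvHeadDNe (L : List Char) (c d : Char) (hc : c ≠ '+') (hd : d ≠ '+') :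
    ((L.headD c == '+') : Bool) = (L.headD d == '+') := by
  cases L with
  | nil => simp [hc, hd]
  | cons a t => simp

-- DFA invariant: from a live state, the run computes A's all-check together with
-- "the last non-space char is '+'" (state 'P' = last non-space so far was '+')
theorem pvMain (cs : List Char) (st : Char) (hst : st = 'P' ∨ st = 'B') :
    pvDfaRun cs st =
      ((cs.all (fun c => c == '+' || c == '-' || c == '=' || c == ' '))
        && ((List.dropWhile PySem.Chars.isspace cs.reverse).headD
              (if st == 'P' then '+' else '-') == '+')) := by
  induction cs generalizing st with
  | nil =>
    rcases hst with h | h <;> subst h <;> decide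
  | cons c cs ih =>
    by_cases hset : (c == '+' || c == '-' || c == '=' || c == ' ') = true
    · have hrow : (PySem.Dict.get? pvDFA st).bind (fun row => PySem.Dict.get? row c) =
        (if c == '+' then some 'P' else if c == '-' then some 'B'
         else if c == '=' then some 'B' else if c == ' ' then some st else none) := by
        rcases hst with h | h <;> subst h
        · rw [pvStepP]
        · rw [pvStepB]
      by_cases hsp : c = ' '
      · subst hsp
        have hdef : pvDfaRun (' ' :: cs) st = pvDfaRun cs st := by
          rw [pvDfaRun, hrow]; rfl
        rw [hdef, ih st hst, List.reverse_cons, pvKeySp]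
        simp
      · have hc : c = '+' ∨ c = '-' ∨ c = '=' := by
          simp only [Bool.or_eq_true, beq_iff_eq] at hset
          rcases hset with ((h|h)|h)|h
          · exact Or.inl h
          · exact Or.inr (Or.inl h)
          · exact Or.inr (Or.inr h)
          · exact absurd h hsp
        rcases hc with hc | hc | hc
        · subst hc
          have hdef : pvDfaRun ('+' :: cs) st = pvDfaRun cs 'P' := by
            rw [pvDfaRun, hrow]; rfl
          rw [hdef, ih 'P' (Or.inl rfl), List.reverse_cons,
            pvKeyD cs.reverse '+' _ (by decide)]
          simp
        · subst hc
          have hdef : pvDfaRun ('-' :: cs) st = pvDfaRun cs 'B' := by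
            rw [pvDfaRun, hrow]; rfl
          rw [hdef, ih 'B' (Or.inr rfl), List.reverse_cons,
            pvKeyD cs.reverse '-' _ (by decide)]
          simp
        · subst hc
          have hdef : pvDfaRun ('=' :: cs) st = pvDfaRun cs 'B' := by
            rw [pvDfaRun, hrow]; rfl
          rw [hdef, ih 'B' (Or.inr rfl), List.reverse_cons,
            pvKeyD cs.reverse '=' _ (by decide),
            pvHeadDNe _ '=' '-' (by decide) (by decide)]
          simp
    · have hdead : (PySem.Dict.get? pvDFA st).bind (fun row => PySem.Dict.get? row c) = none := by
        rcases hst with h | h <;> subst h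
        · rw [pvStepP]; simp only [Bool.or_eq_true, not_or] at hset; simp_all
        · rw [pvStepB]; simp only [Bool.or_eq_true, not_or] at hset; simp_all
      rw [pvDfaRun, hdead]
      simp [hset]

-- A's rstrip/endswith pair reads the head of the whitespace-stripped reversed list
theorem pvEndsRstrip (xs : List Char) :
    PySem.Chars.endswith (PySem.Chars.rstrip xs) ['+'] =
      ((List.dropWhile PySem.Chars.isspace xs.reverse).head? == some '+') := by
  cases h : List.dropWhile PySem.Chars.isspace xs.reverse with
  | nil => simp [PySem.Chars.endswith, PySem.Chars.rstrip, List.isSuffixOf, h]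
  | cons a t =>
    simp [PySem.Chars.endswith, PySem.Chars.rstrip, List.isSuffixOf, h, List.isPrefixOf, eq_comm]

-- ===== VERDICT (by name: the statement is the Claim_ definition above) =====
theorem is_grid_separator_line_py_spec : Claim_equal_is_grid_separator_line_py := by
  intro line _
  unfold Spec_is_grid_separator_line_py is_grid_separator_line_py is_grid_separator_line_py_alt
  cases h : line.toList with
  | nil => simp [PySem.Chars.startswith, List.isPrefixOf, pvDfaRun]
  | cons c cs =>
    by_cases hc : c = '+'
    · subst hc
      have hsw : PySem.Chars.startswith ('+' :: cs) ['+'] = true := by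
        simp [PySem.Chars.startswith, List.isPrefixOf]
      have hin : PySem.Chars.isIn ['+'] ('+' :: cs) = true :=
        (PySem.Chars.isIn_iff_infix _ _).mpr ⟨[], cs, rfl⟩
      rw [if_neg (by simp [hsw])]
      have hdef : pvDfaRun ('+' :: cs) 'S' = pvDfaRun cs 'P' := by
        rw [pvDfaRun, pvStepS]; norm_num
      rw [hdef, pvMain cs 'P' (Or.inl rfl), pvEndsRstrip, hin]
      simp only [List.reverse_cons, pvKey cs.reverse '+' (by decide)]
      simp [List.all_cons]
    · have hsw : PySem.Chars.startswith (c :: cs) ['+'] = false := by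
        simp [PySem.Chars.startswith, List.isPrefixOf]
        exact fun h => absurd h.symm hc
      have hdead : pvDfaRun (c :: cs) 'S' = false := by
        rw [pvDfaRun, pvStepS]; simp [hc]
      simp [hsw, hdead]
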